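-- pv_equiv track=rewrite | github.com/chaindmhl/EXIM | board_exam/views.py | extract_choices_by_letter
-- ===== SOURCE A (Python) =====
-- def extract_choices_by_letter(questions):
--     letters = ['A', 'B', 'C', 'D', 'E']
--     choice_map = {letter: [] for letter in letters}
--     for q in questions:
--         q_choices = q.get('choices', [])
--         for i, letter in enumerate(letters):
--             if i < len(q_choices):
--                 choice_map[letter].append(q_choices[i]['text'])
--             else:
--                 choice_map[letter].append(None)  # pad empty choices
--     return choice_map
-- ===== SOURCE B (Python) =====
-- def extract_choices_by_letter(questions):
--     letters = ['A', 'B', 'C', 'D', 'E']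
--     rows = []
--     for q in questions:
--         q_choices = q.get('choices', [])
--         rows.append([q_choices[i]['text'] if i < len(q_choices) else None
--                      for i in range(5)])
--     columns = list(zip(*rows)) if rows else [()] * 5
--     return {letters[k]: list(columns[k]) for k in range(5)}
-- ===== Notes on version B (the rewrite author's own statement) =====
-- stated objective: alternative
-- what changed: B builds one padded 5-element row per question and then transposes the row matrix into five per-letter columns, instead of A's appending into five letter-keyed dict lists inside the question loop.
-- outside the precondition, e.g. on extract_choices_by_letter([{'choices': [{'txt': 'x'}]}]): A raises KeyError, B raises KeyError
import Mathlib
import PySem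

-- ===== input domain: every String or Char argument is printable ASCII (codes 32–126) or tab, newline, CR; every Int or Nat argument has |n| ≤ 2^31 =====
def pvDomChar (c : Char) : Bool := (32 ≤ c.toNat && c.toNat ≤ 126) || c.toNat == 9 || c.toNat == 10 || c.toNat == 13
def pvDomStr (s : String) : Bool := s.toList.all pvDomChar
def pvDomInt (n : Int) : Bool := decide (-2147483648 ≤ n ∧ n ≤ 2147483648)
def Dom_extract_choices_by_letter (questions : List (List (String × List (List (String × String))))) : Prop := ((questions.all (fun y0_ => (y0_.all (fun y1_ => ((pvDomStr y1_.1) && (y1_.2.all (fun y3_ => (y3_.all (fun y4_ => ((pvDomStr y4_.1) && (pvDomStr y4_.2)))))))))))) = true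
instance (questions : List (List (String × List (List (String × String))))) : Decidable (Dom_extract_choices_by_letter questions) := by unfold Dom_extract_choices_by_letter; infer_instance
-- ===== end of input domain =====

-- B builds a padded 5-wide row per question and transposes, instead of appending
-- into five per-letter lists inside the question loop (objective: alternative decomposition).


-- ===== PORT A =====
def extract_choices_by_letter (questions : List (List (String × List (List (String × String))))) : List (String × List (Option String)) :=
  let letters : List String := ["A", "B", "C", "D", "E"]
  let choice_map : PySem.Dict String (List (Option String)) :=
    letters.foldl (fun d l => d.insert l []) PySem.Dict.empty
  let final := questions.foldl (fun d q =>
    let q_choices := (PySem.Dict.mk q).getD "choices" []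
    (PySem.List.enumerate letters).foldl (fun d il =>
      if il.1 < (q_choices.length : Int) then
        d.modify il.2 [] (fun xs => xs ++
          [some (((PySem.Dict.mk (PySem.List.pyGetD q_choices il.1 [])).get? "text").getD "")])
      else
        d.modify il.2 [] (fun xs => xs ++ [none])) d) choice_map
  final.items

-- ===== PORT B =====
def extract_choices_by_letter_alt (questions : List (List (String × List (List (String × String))))) : List (String × List (Option String)) :=
  let letters : List String := ["A", "B", "C", "D", "E"]
  let rows : List (List (Option String)) := questions.map (fun q =>
    let q_choices := (PySem.Dict.mk q).getD "choices" []
    (List.range 5).map (fun i =>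
      if (i : Int) < (q_choices.length : Int) then
        some (((PySem.Dict.mk (PySem.List.pyGetD q_choices (i : Int) [])).get? "text").getD "")
      else none))
  -- zip(*rows): all rows have length 5, so column k is rows.map (·.getD k none)
  let columns : List (List (Option String)) :=
    if rows = [] then List.replicate 5 []
    else (List.range 5).map (fun k => rows.map (fun r => r.getD k none))
  (List.range 5).map (fun k => (letters.getD k "", columns.getD k []))

-- ===== PRECONDITION & SPEC =====
-- Pre_ excludes inputs where some question's first five choice dicts lack the key
-- "text": there Python A (and B) raise KeyError.
def Pre_extract_choices_by_letter (questions : List (List (String × List (List (String × String))))) : Prop :=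
  (questions.all (fun q =>
    (((PySem.Dict.mk q).getD "choices" []).take 5).all (fun c =>
      ((PySem.Dict.mk c).get? "text").isSome))) = true
instance (questions : List (List (String × List (List (String × String))))) : Decidable (Pre_extract_choices_by_letter questions) := by unfold Pre_extract_choices_by_letter; infer_instance

def pvWitness_extract_choices_by_letter : (List (List (String × List (List (String × String))))) :=
  [[("choices", [[("text", "yes")], [("text", "no")]])], [("title", [])]]

def Spec_extract_choices_by_letter (questions : List (List (String × List (List (String × String))))) (out : List (String × List (Option String))) : Prop := out = extract_choices_by_letter_alt questions
instance (questions : List (List (String × List (List (String × String))))) (out : List (String × List (Option String))) : Decidable (Spec_extract_choices_by_letter questions out) := by unfold Spec_extract_choices_by_letter; infer_instance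

-- ===== CLAIM (what is proved, stated in full; the proofs are below) =====
def Claim_equal_extract_choices_by_letter : Prop := ∀ (questions : List (List (String × List (List (String × String))))), Dom_extract_choices_by_letter questions → Pre_extract_choices_by_letter questions → Spec_extract_choices_by_letter questions (extract_choices_by_letter questions)

-- ===== LEMMAS AND PROOFS =====

-- the entry appended for question q at letter index i (shared characterisation of both ports)
def pvEntry (q : List (String × List (List (String × String)))) (i : Int) : Option String :=
  let qc := (PySem.Dict.mk q).getD "choices" []
  if i < (qc.length : Int) then
    some (((PySem.Dict.mk (PySem.List.pyGetD qc i [])).get? "text").getD "")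
  else none

def pvMk5 (a b c d e : List (Option String)) : PySem.Dict String (List (Option String)) :=
  PySem.Dict.mk [("A", a), ("B", b), ("C", c), ("D", d), ("E", e)]

lemma pvIteModifyAppend {κ ν : Type} [BEq κ] (c : Prop) [Decidable c] (d : PySem.Dict κ (List ν)) (l : κ) (v1 v2 : ν) :
    (if c then d.modify l [] (fun xs => xs ++ [v1]) else d.modify l [] (fun xs => xs ++ [v2]))
    = d.modify l [] (fun xs => xs ++ [if c then v1 else v2]) := by split_ifs <;> rfl

lemma pvA_step (a b c d e : List (Option String)) (q : List (String × List (List (String × String)))) :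
    (PySem.List.enumerate ["A", "B", "C", "D", "E"]).foldl (fun d il =>
      if il.1 < ((((PySem.Dict.mk q).getD "choices" []).length : Int)) then
        d.modify il.2 [] (fun xs => xs ++
          [some (((PySem.Dict.mk (PySem.List.pyGetD ((PySem.Dict.mk q).getD "choices" []) il.1 [])).get? "text").getD "")])
      else
        d.modify il.2 [] (fun xs => xs ++ [none])) (pvMk5 a b c d e)
    = pvMk5 (a ++ [pvEntry q 0]) (b ++ [pvEntry q 1]) (c ++ [pvEntry q 2]) (d ++ [pvEntry q 3]) (e ++ [pvEntry q 4]) := by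
  simp only [PySem.List.enumerate, List.foldl, pvIteModifyAppend]
  rfl

lemma pvA_loop (qs : List (List (String × List (List (String × String))))) :
    ∀ a b c d e : List (Option String),
    qs.foldl (fun d q =>
      let q_choices := (PySem.Dict.mk q).getD "choices" []
      (PySem.List.enumerate ["A", "B", "C", "D", "E"]).foldl (fun d il =>
        if il.1 < (q_choices.length : Int) then
          d.modify il.2 [] (fun xs => xs ++
            [some (((PySem.Dict.mk (PySem.List.pyGetD q_choices il.1 [])).get? "text").getD "")])
        else
          d.modify il.2 [] (fun xs => xs ++ [none])) d) (pvMk5 a b c d e)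
    = pvMk5 (a ++ qs.map (pvEntry · 0)) (b ++ qs.map (pvEntry · 1)) (c ++ qs.map (pvEntry · 2))
            (d ++ qs.map (pvEntry · 3)) (e ++ qs.map (pvEntry · 4)) := by
  induction qs with
  | nil => intro a b c d e; simp
  | cons q qs ih =>
      intro a b c d e
      simp only [List.foldl_cons, List.map_cons]
      rw [pvA_step, ih]
      simp

lemma pvA_char (qs : List (List (String × List (List (String × String))))) :
    extract_choices_by_letter qs =
      [("A", qs.map (pvEntry · 0)), ("B", qs.map (pvEntry · 1)), ("C", qs.map (pvEntry · 2)),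
       ("D", qs.map (pvEntry · 3)), ("E", qs.map (pvEntry · 4))] := by
  show (qs.foldl _ (pvMk5 [] [] [] [] [])).items = _
  rw [pvA_loop]
  simp [pvMk5]

lemma pvB_char (qs : List (List (String × List (List (String × String))))) :
    extract_choices_by_letter_alt qs =
      [("A", qs.map (pvEntry · 0)), ("B", qs.map (pvEntry · 1)), ("C", qs.map (pvEntry · 2)),
       ("D", qs.map (pvEntry · 3)), ("E", qs.map (pvEntry · 4))] := by
  cases qs with
  | nil => rfl
  | cons q qs =>
      have hrows : (q :: qs).map (fun q =>
          let q_choices := (PySem.Dict.mk q).getD "choices" []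
          (List.range 5).map (fun i =>
            if (i : Int) < (q_choices.length : Int) then
              some (((PySem.Dict.mk (PySem.List.pyGetD q_choices (i : Int) [])).get? "text").getD "")
            else none)) = (q :: qs).map (fun q => (List.range 5).map (fun i => pvEntry q (i : Int))) := by
        simp only [pvEntry]
      simp only [extract_choices_by_letter_alt, hrows]
      have hne : (q :: qs).map (fun q => (List.range 5).map (fun i => pvEntry q (i : Int))) ≠ ([] : List (List (Option String))) := by simp
      simp only [if_neg hne, List.map_map]
      rfl

-- ===== VERDICT (by name: the statement is the Claim_ definition above) =====
theorem extract_choices_by_letter_spec : Claim_equal_extract_choices_by_letter := by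
  intro qs _ _
  unfold Spec_extract_choices_by_letter
  rw [pvA_char, pvB_char]
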